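-- pv_equiv track=rewrite | github.com/zjunet/TrimDG | utils/utils.py | remove_redundant_timestamps
-- ===== SOURCE A (Python) =====
-- def remove_redundant_timestamps(timestamps, nodes, window_size):
--     combined = sorted(zip(timestamps, nodes), key=lambda x: x[0])
--     result = []
--     drop_result = []
--     for t, node in combined:
--         window_start = t - window_size
--         has_duplicate = False
--         i = len(result) - 1
--         while i >= 0 and result[i][0] >= window_start:
--             if result[i][1] == node:
--                 has_duplicate = True
--                 break
--             i -= 1
--         if not has_duplicate:
--             result.append((t, node))
--         else:
--             drop_result.append((t, node))
--     filtered_timestamps = [t for t, node in result]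
--     filtered_nodes = [node for t, node in result]
--     drop_filtered_timestamps = [t for t, node in drop_result]
--     drop_filtered_nodes = [node for t, node in drop_result]
--     return filtered_timestamps, filtered_nodes, drop_filtered_timestamps, drop_filtered_nodes
-- ===== SOURCE B (Python) =====
-- def remove_redundant_timestamps(timestamps, nodes, window_size):
--     combined = sorted(zip(timestamps, nodes), key=lambda x: x[0])
--     last_kept = {}
--     filtered_timestamps = []
--     filtered_nodes = []
--     drop_filtered_timestamps = []
--     drop_filtered_nodes = []
--     for t, node in combined:
--         prev = last_kept.get(node)
--         if prev is not None and prev >= t - window_size: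
--             drop_filtered_timestamps.append(t)
--             drop_filtered_nodes.append(node)
--         else:
--             last_kept[node] = t
--             filtered_timestamps.append(t)
--             filtered_nodes.append(node)
--     return filtered_timestamps, filtered_nodes, drop_filtered_timestamps, drop_filtered_nodes
-- ===== Notes on version B (the rewrite author's own statement) =====
-- stated objective: faster
-- what changed: Replaces A's backward scan of all previously kept events per element (quadratic) with a dict holding the last kept timestamp per node, so each duplicate check is a single O(1) lookup.
import Mathlib
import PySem

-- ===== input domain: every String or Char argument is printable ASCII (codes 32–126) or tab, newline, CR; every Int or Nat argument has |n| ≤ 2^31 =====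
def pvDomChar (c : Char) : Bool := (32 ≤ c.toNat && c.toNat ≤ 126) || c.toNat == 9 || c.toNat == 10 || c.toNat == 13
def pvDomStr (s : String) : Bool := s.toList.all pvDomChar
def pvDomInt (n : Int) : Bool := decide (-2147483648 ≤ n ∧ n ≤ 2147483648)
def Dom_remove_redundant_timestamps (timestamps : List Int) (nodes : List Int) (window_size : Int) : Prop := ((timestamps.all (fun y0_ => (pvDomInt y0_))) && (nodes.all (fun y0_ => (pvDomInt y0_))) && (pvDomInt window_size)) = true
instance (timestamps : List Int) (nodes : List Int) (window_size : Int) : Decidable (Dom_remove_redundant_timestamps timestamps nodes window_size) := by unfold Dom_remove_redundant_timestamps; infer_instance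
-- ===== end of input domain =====

-- B replaces A's per-element backward scan over all kept events with a dict of the last kept
-- timestamp per node (objective: faster, asymptotic).

-- ===== PORT A =====
-- A's inner `while i >= 0 and result[i][0] >= window_start` loop, walking result from its end
-- (it receives result.reverse); branches in the order of A's code.
def pvScanA : List (Int × Int) → Int → Int → Bool
  | [], _, _ => false
  | (ts, nd) :: rest, ws, node =>
    if ts < ws then false
    else if nd == node then true
    else pvScanA rest ws node

-- the body of A's `for t, node in combined` loop, state = (result, drop_result)
def pvStepA (window_size : Int) (st : List (Int × Int) × List (Int × Int)) (x : Int × Int) :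
    List (Int × Int) × List (Int × Int) :=
  let ws := x.1 - window_size
  if pvScanA st.1.reverse ws x.2 then (st.1, st.2 ++ [x]) else (st.1 ++ [x], st.2)

def remove_redundant_timestamps (timestamps : List Int) (nodes : List Int) (window_size : Int) : List Int × List Int × List Int × List Int :=
  let combined := PySem.List.sorted (timestamps.zip nodes) (fun x => x.1) false
  let st := combined.foldl (pvStepA window_size) ([], [])
  (st.1.map Prod.fst, st.1.map Prod.snd, st.2.map Prod.fst, st.2.map Prod.snd)

-- ===== PORT B =====
-- the body of B's loop, state = (last_kept, filtered_timestamps, filtered_nodes, drop_filtered_timestamps, drop_filtered_nodes)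
def pvStepB (window_size : Int)
    (st : PySem.Dict Int Int × List Int × List Int × List Int × List Int) (x : Int × Int) :
    PySem.Dict Int Int × List Int × List Int × List Int × List Int :=
  match st.1.get? x.2 with
  | some prev =>
    if prev ≥ x.1 - window_size then
      (st.1, st.2.1, st.2.2.1, st.2.2.2.1 ++ [x.1], st.2.2.2.2 ++ [x.2])
    else
      (st.1.insert x.2 x.1, st.2.1 ++ [x.1], st.2.2.1 ++ [x.2], st.2.2.2.1, st.2.2.2.2)
  | none =>
      (st.1.insert x.2 x.1, st.2.1 ++ [x.1], st.2.2.1 ++ [x.2], st.2.2.2.1, st.2.2.2.2)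

def remove_redundant_timestamps_alt (timestamps : List Int) (nodes : List Int) (window_size : Int) : List Int × List Int × List Int × List Int :=
  let combined := PySem.List.sorted (timestamps.zip nodes) (fun x => x.1) false
  let st := combined.foldl (pvStepB window_size) (PySem.Dict.empty, [], [], [], [])
  st.2

-- ===== PRECONDITION & SPEC =====
def Spec_remove_redundant_timestamps (timestamps : List Int) (nodes : List Int) (window_size : Int) (out : List Int × List Int × List Int × List Int) : Prop := out = remove_redundant_timestamps_alt timestamps nodes window_size
instance (timestamps : List Int) (nodes : List Int) (window_size : Int) (out : List Int × List Int × List Int × List Int) : Decidable (Spec_remove_redundant_timestamps timestamps nodes window_size out) := by unfold Spec_remove_redundant_timestamps; infer_instance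

-- ===== CLAIM (what is proved, stated in full; the proofs are below) =====
def Claim_equal_remove_redundant_timestamps : Prop := ∀ (timestamps : List Int) (nodes : List Int) (window_size : Int), Dom_remove_redundant_timestamps timestamps nodes window_size → Spec_remove_redundant_timestamps timestamps nodes window_size (remove_redundant_timestamps timestamps nodes window_size)

-- ===== LEMMAS AND PROOFS =====

-- the timestamp of the LAST kept event of node nd (= what B's dict stores)
def pvLastTs (r : List (Int × Int)) (nd : Int) : Option Int :=
  ((r.filter (fun p => p.2 == nd)).map Prod.fst).getLast?

theorem pvLastTs_append_single (r : List (Int × Int)) (y : Int × Int) (nd : Int) :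
    pvLastTs (r ++ [y]) nd = if y.2 = nd then some y.1 else pvLastTs r nd := by
  unfold pvLastTs
  by_cases h : y.2 = nd <;>
    simp [List.filter_append, h, List.getLast?_append]

theorem pvLastTs_mem (r : List (Int × Int)) (nd p : Int) (h : pvLastTs r nd = some p) :
    ∃ z ∈ r, z.1 = p := by
  unfold pvLastTs at h
  have hp : p ∈ (r.filter (fun p => p.2 == nd)).map Prod.fst := by
    rcases List.getLast?_eq_some_iff.1 h with ⟨l', hl'⟩
    rw [hl']; simp
  simp only [List.mem_map, List.mem_filter] at hp
  obtain ⟨z, ⟨hz, _⟩, hz1⟩ := hp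
  exact ⟨z, hz, hz1⟩

-- on a timestamp-nondecreasing kept list, A's backward scan answers exactly
-- "is the last kept timestamp of this node ≥ window_start"
theorem pvScan_eq_lastTs (r : List (Int × Int)) (ws node : Int)
    (hr : r.Pairwise (fun a b => a.1 ≤ b.1)) :
    pvScanA r.reverse ws node =
      (match pvLastTs r node with
       | some p => decide (ws ≤ p)
       | none => false) := by
  induction r using List.reverseRecOn with
  | nil => simp [pvScanA, pvLastTs]
  | append_singleton r' y ih =>
    rw [List.pairwise_append] at hr
    obtain ⟨hr', -, hle⟩ := hr
    rw [List.reverse_append]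
    simp only [List.reverse_singleton, List.singleton_append]
    rw [pvLastTs_append_single]
    show pvScanA ((y.1, y.2) :: r'.reverse) ws node = _
    rw [pvScanA]
    by_cases hn : y.2 = node
    · simp only [hn, beq_self_eq_true, if_true]
      by_cases hlt : y.1 < ws
      · simp [hlt, show ¬ (ws ≤ y.1) by omega]
      · simp [hlt, show ws ≤ y.1 by omega]
    · simp only [beq_iff_eq, if_neg hn]
      by_cases hlt : y.1 < ws
      · simp only [if_pos hlt]
        cases hp : pvLastTs r' node with
        | none => rfl
        | some p =>
          obtain ⟨z, hz, hz1⟩ := pvLastTs_mem r' node p hp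
          have : z.1 ≤ y.1 := hle z hz y (List.mem_singleton_self y)
          simp [show ¬ (ws ≤ p) by omega]
      · simp only [if_neg hlt]
        exact ih hr'

-- the main loop invariant: B's fold tracks A's fold exactly
theorem pvLoop_eq (w : Int) (l : List (Int × Int)) :
    ∀ (r d : List (Int × Int)) (last : PySem.Dict Int Int),
    l.Pairwise (fun a b => a.1 ≤ b.1) →
    (∀ x ∈ r, ∀ y ∈ l, x.1 ≤ y.1) →
    r.Pairwise (fun a b => a.1 ≤ b.1) →
    (∀ nd, last.get? nd = pvLastTs r nd) →
    (l.foldl (pvStepB w) (last, r.map Prod.fst, r.map Prod.snd, d.map Prod.fst, d.map Prod.snd)).2 =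
      ((l.foldl (pvStepA w) (r, d)).1.map Prod.fst,
       (l.foldl (pvStepA w) (r, d)).1.map Prod.snd,
       (l.foldl (pvStepA w) (r, d)).2.map Prod.fst,
       (l.foldl (pvStepA w) (r, d)).2.map Prod.snd) := by
  induction l with
  | nil => intro r d last _ _ _ _; rfl
  | cons x l ih =>
    intro r d last hl hle hr hdict
    rw [List.pairwise_cons] at hl
    obtain ⟨hxl, hl'⟩ := hl
    have hscan := pvScan_eq_lastTs r (x.1 - w) x.2 hr
    rw [← hdict x.2] at hscan
    simp only [List.foldl_cons]
    have hstepA : pvStepA w (r, d) x =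
        if pvScanA r.reverse (x.1 - w) x.2 then (r, d ++ [x]) else (r ++ [x], d) := rfl
    cases hget : last.get? x.2 with
    | some prev =>
      rw [hget] at hscan
      by_cases hdup : x.1 - w ≤ prev
      · -- duplicate: both drop
        have hsc : pvScanA r.reverse (x.1 - w) x.2 = true := by
          rw [hscan]; simpa using hdup
        have hB : pvStepB w (last, r.map Prod.fst, r.map Prod.snd, d.map Prod.fst, d.map Prod.snd) x =
            (last, r.map Prod.fst, r.map Prod.snd, (d ++ [x]).map Prod.fst, (d ++ [x]).map Prod.snd) := by
          simp [pvStepB, hget, show prev ≥ x.1 - w from hdup]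
        rw [hB, hstepA, if_pos hsc]
        exact ih r (d ++ [x]) last hl' (fun z hz y hy => hle z hz y (List.mem_cons_of_mem x hy)) hr hdict
      · -- kept
        have hsc : pvScanA r.reverse (x.1 - w) x.2 = false := by
          rw [hscan]; simpa using hdup
        have hB : pvStepB w (last, r.map Prod.fst, r.map Prod.snd, d.map Prod.fst, d.map Prod.snd) x =
            (last.insert x.2 x.1, (r ++ [x]).map Prod.fst, (r ++ [x]).map Prod.snd, d.map Prod.fst, d.map Prod.snd) := by
          simp [pvStepB, hget, show ¬ (prev ≥ x.1 - w) from hdup]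
        rw [hB, hstepA, if_neg (by simp [hsc])]
        refine ih (r ++ [x]) d (last.insert x.2 x.1) hl' ?_ ?_ ?_
        · intro z hz y hy
          rcases List.mem_append.1 hz with hz | hz
          · exact hle z hz y (List.mem_cons_of_mem x hy)
          · simp at hz; subst hz; exact hxl y hy
        · rw [List.pairwise_append]
          exact ⟨hr, List.pairwise_singleton _ _, fun a ha b hb => by
            simp at hb; rw [hb]; exact hle a ha x (by simp)⟩
        · intro nd
          rw [PySem.Dict.get?_insert, pvLastTs_append_single]
          by_cases h : nd = x.2
          · simp [h]
          · simp [h, Ne.symm h, hdict nd]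
    | none =>
      rw [hget] at hscan
      have hsc : pvScanA r.reverse (x.1 - w) x.2 = false := by rw [hscan]
      have hB : pvStepB w (last, r.map Prod.fst, r.map Prod.snd, d.map Prod.fst, d.map Prod.snd) x =
          (last.insert x.2 x.1, (r ++ [x]).map Prod.fst, (r ++ [x]).map Prod.snd, d.map Prod.fst, d.map Prod.snd) := by
        simp [pvStepB, hget]
      rw [hB, hstepA, if_neg (by simp [hsc])]
      refine ih (r ++ [x]) d (last.insert x.2 x.1) hl' ?_ ?_ ?_
      · intro z hz y hy
        rcases List.mem_append.1 hz with hz | hz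
        · exact hle z hz y (List.mem_cons_of_mem x hy)
        · simp at hz; subst hz; exact hxl y hy
      · rw [List.pairwise_append]
        exact ⟨hr, List.pairwise_singleton _ _, fun a ha b hb => by
          simp at hb; rw [hb]; exact hle a ha x (by simp)⟩
      · intro nd
        rw [PySem.Dict.get?_insert, pvLastTs_append_single]
        by_cases h : nd = x.2
        · simp [h]
        · simp [h, Ne.symm h, hdict nd]

-- ===== VERDICT (by name: the statement is the Claim_ definition above) =====
theorem remove_redundant_timestamps_spec : Claim_equal_remove_redundant_timestamps := by
  intro timestamps nodes window_size _
  unfold Spec_remove_redundant_timestamps remove_redundant_timestamps remove_redundant_timestamps_alt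
  have h := pvLoop_eq window_size (PySem.List.sorted (timestamps.zip nodes) (fun x => x.1) false)
    [] [] PySem.Dict.empty
    (PySem.List.sorted_pairwise _ _)
    (by intro x hx; simp at hx)
    (List.Pairwise.nil)
    (by intro nd; simp [PySem.Dict.get?_empty, pvLastTs])
  simpa using h.symm
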